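-- pv_equiv track=rewrite | github.com/theIDinside/mdebug | lib/binlog/scripts/format_indexer.py | deduplicate_formats
-- ===== SOURCE A (Python) =====
-- from typing import Dict, List, Tuple
--
-- def deduplicate_formats(format_list: List[Tuple[str, str, int]]) -> Dict[str, int]:
--     """
--     Deduplicate format strings and assign sequential IDs.
--     Returns dict mapping format_string → ID.
--     """
--     # Use dict to preserve insertion order (Python 3.7+) and deduplicate
--     unique_formats = {}
--     next_id = 1
--
--     for format_str, file_path, line_num in format_list:
--         if format_str not in unique_formats:
--             unique_formats[format_str] = next_id
--             next_id += 1
--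
--     return unique_formats
-- ===== SOURCE B (Python) =====
-- from typing import Dict, List, Tuple
--
-- def deduplicate_formats(format_list: List[Tuple[str, str, int]]) -> Dict[str, int]:
--     """
--     Deduplicate format strings and assign sequential IDs.
--     Returns dict mapping format_string -> ID.
--     """
--     # Selection-style dedup: repeatedly take the head key, assign it the next
--     # rank, and filter every remaining occurrence of that key out of the
--     # worklist.  No membership test against the result is ever needed.
--     result = {}
--     work = list(format_list)
--     rank = 1
--     while work:
--         head = work[0][0]
--         result[head] = rank
--         rank += 1
--         work = [t for t in work[1:] if t[0] != head]
--     return result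
-- ===== Notes on version B (the rewrite author's own statement) =====
-- stated objective: alternative
-- what changed: Replaces A's single pass with a dict-membership test and a next_id counter by a selection-style worklist loop: repeatedly emit the head key with the next rank and filter all of its occurrences out of the remaining list, so no seen-set/membership test exists at all.
import Mathlib
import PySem

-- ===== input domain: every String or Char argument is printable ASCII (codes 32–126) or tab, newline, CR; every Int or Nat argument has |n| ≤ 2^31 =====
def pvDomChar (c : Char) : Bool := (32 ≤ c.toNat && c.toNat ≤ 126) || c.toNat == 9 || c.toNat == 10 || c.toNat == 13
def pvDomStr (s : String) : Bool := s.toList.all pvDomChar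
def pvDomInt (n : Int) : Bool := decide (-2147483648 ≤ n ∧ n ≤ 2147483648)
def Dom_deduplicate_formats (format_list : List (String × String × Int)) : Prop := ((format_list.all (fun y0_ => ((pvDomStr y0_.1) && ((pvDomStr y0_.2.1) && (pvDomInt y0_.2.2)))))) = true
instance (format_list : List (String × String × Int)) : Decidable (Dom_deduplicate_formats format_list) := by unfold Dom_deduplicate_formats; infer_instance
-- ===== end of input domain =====

-- B replaces A's membership-tested single pass by a selection-style worklist loop
-- (emit head key, filter its occurrences out of the rest); alternative, same results.

-- ===== PORT A =====
-- loop: for (format_str, _, _) in format_list: if format_str not in dict: dict[format_str] = next_id; next_id += 1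
def deduplicate_formats (format_list : List (String × String × Int)) : List (String × Int) :=
  (format_list.foldl
    (fun (st : PySem.Dict String Int × Int) t =>
      if ¬ (st.1.contains t.1 = true) then (st.1.insert t.1 st.2, st.2 + 1) else st)
    (PySem.Dict.mk [], 1)).1.items

-- ===== PORT B =====
-- while work: head = work[0][0]; result[head] = rank; rank += 1; work = [t for t in work[1:] if t[0] != head]
def pvAltLoop (result : List (String × Int)) (rank : Int) : List (String × String × Int) → List (String × Int)
  | [] => result
  | t :: rest =>
      pvAltLoop (result ++ [(t.1, rank)]) (rank + 1) (rest.filter (fun u => u.1 != t.1))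
termination_by work => work.length
decreasing_by
  simp only [List.unattach, List.length_map, List.length_cons]
  exact Nat.lt_succ_of_le (le_trans (List.length_filter_le _ _) (by simp))

def deduplicate_formats_alt (format_list : List (String × String × Int)) : List (String × Int) :=
  pvAltLoop [] 1 format_list

-- ===== PRECONDITION & SPEC =====
def Spec_deduplicate_formats (format_list : List (String × String × Int)) (out : List (String × Int)) : Prop := out = deduplicate_formats_alt format_list
instance (format_list : List (String × String × Int)) (out : List (String × Int)) : Decidable (Spec_deduplicate_formats format_list out) := by unfold Spec_deduplicate_formats; infer_instance

-- ===== CLAIM (what is proved, stated in full; the proofs are below) =====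
def Claim_equal_deduplicate_formats : Prop := ∀ (format_list : List (String × String × Int)), Dom_deduplicate_formats format_list → Spec_deduplicate_formats format_list (deduplicate_formats format_list)

-- ===== LEMMAS AND PROOFS =====

-- common recursive specification: assign ids starting at n, skipping keys already seen
def pvBuild (seen : List String) (n : Int) : List (String × String × Int) → List (String × Int)
  | [] => []
  | t :: rest =>
      if seen.contains t.1 then pvBuild seen n rest
      else (t.1, n) :: pvBuild (seen ++ [t.1]) (n + 1) rest

theorem pvDict_contains_iff (d : List (String × Int)) (k : String) :
    (PySem.Dict.mk d).contains k = true ↔ k ∈ d.map (fun p => p.1) := by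
  simp only [PySem.Dict.contains, List.any_eq_true, beq_iff_eq, List.mem_map]

theorem pvA_loop (fl : List (String × String × Int)) (d : List (String × Int)) (n : Int) :
    (fl.foldl
      (fun (st : PySem.Dict String Int × Int) t =>
        if ¬ (st.1.contains t.1 = true) then (st.1.insert t.1 st.2, st.2 + 1) else st)
      (PySem.Dict.mk d, n)).1.items = d ++ pvBuild (d.map (fun p => p.1)) n fl := by
  induction fl generalizing d n with
  | nil => simp [pvBuild]
  | cons t rest ih =>
    simp only [List.foldl_cons, pvBuild]
    by_cases h : t.1 ∈ d.map (fun p => p.1)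
    · have hc : (PySem.Dict.mk d).contains t.1 = true := (pvDict_contains_iff d t.1).2 h
      rw [if_neg (by simp [hc]), ih]
      simp [h]
    · have hc : ¬ (PySem.Dict.mk d).contains t.1 = true :=
        fun hh => h ((pvDict_contains_iff d t.1).1 hh)
      rw [if_pos hc]
      have hins : (PySem.Dict.mk d).insert t.1 n = PySem.Dict.mk (d ++ [(t.1, n)]) := by
        rw [PySem.Dict.insert, if_neg hc]
      rw [hins, ih]
      simp [h]

-- pvBuild depends on seen only through membership
theorem pvBuild_congr (fl : List (String × String × Int)) (seen1 seen2 : List String) (n : Int)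
    (h : ∀ s, s ∈ seen1 ↔ s ∈ seen2) : pvBuild seen1 n fl = pvBuild seen2 n fl := by
  induction fl generalizing seen1 seen2 n with
  | nil => rfl
  | cons t rest ih =>
    simp only [pvBuild]
    by_cases hm : t.1 ∈ seen1
    · rw [if_pos (by simpa using hm), if_pos (by simpa using (h t.1).1 hm)]
      exact ih seen1 seen2 n h
    · rw [if_neg (by simpa using hm), if_neg (by simpa using fun hh => hm ((h t.1).2 hh))]
      exact congrArg _ (ih _ _ _ (fun s => by simp [h s]))

-- adding k to seen is the same as filtering out every k-keyed tuple
theorem pvBuild_filter (fl : List (String × String × Int)) (seen : List String) (k : String) (n : Int) :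
    pvBuild (seen ++ [k]) n fl = pvBuild seen n (fl.filter (fun u => u.1 != k)) := by
  induction fl generalizing seen n with
  | nil => rfl
  | cons t rest ih =>
    by_cases hk : t.1 = k
    · rw [show List.filter (fun u => u.1 != k) (t :: rest) = List.filter (fun u => u.1 != k) rest from by
        simp [hk]]
      rw [show pvBuild (seen ++ [k]) n (t :: rest) = pvBuild (seen ++ [k]) n rest from by
        simp only [pvBuild]; rw [if_pos (by simp [hk])]]
      exact ih seen n
    · rw [show List.filter (fun u => u.1 != k) (t :: rest) = t :: List.filter (fun u => u.1 != k) rest from by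
        simp [hk]]
      simp only [pvBuild]
      by_cases hm : t.1 ∈ seen
      · rw [if_pos (by simp [hm]), if_pos (by simpa using hm)]
        exact ih seen n
      · rw [if_neg (by simp [hm, hk]), if_neg (by simpa using hm)]
        refine congrArg _ ?_
        rw [pvBuild_congr rest (seen ++ [k] ++ [t.1]) (seen ++ [t.1] ++ [k]) (n + 1)
          (fun s => by simp only [List.mem_append]; tauto), ih]

-- the worklist loop computes pvBuild
theorem pvAltLoop_eq : ∀ (fl : List (String × String × Int)) (res : List (String × Int)) (n : Int),
    pvAltLoop res n fl = res ++ pvBuild [] n fl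
  | [], res, n => by rw [pvAltLoop]; simp [pvBuild]
  | t :: rest, res, n => by
      rw [pvAltLoop,
        pvAltLoop_eq (rest.filter (fun u => u.1 != t.1)) (res ++ [(t.1, n)]) (n + 1)]
      have hf := pvBuild_filter rest [] t.1 (n + 1)
      simp only [List.nil_append] at hf
      simp only [pvBuild, List.contains_nil, if_neg Bool.false_ne_true, hf.symm]
      simp
termination_by fl _ _ => fl.length
decreasing_by
  exact Nat.lt_succ_of_le (List.length_filter_le _ _)

-- ===== VERDICT (by name: the statement is the Claim_ definition above) =====
theorem deduplicate_formats_spec : Claim_equal_deduplicate_formats := by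
  intro fl _
  show deduplicate_formats fl = deduplicate_formats_alt fl
  rw [deduplicate_formats, deduplicate_formats_alt, pvA_loop, pvAltLoop_eq]
  simp
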